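-- pv_equiv track=rewrite | github.com/JasperSrrzn/immowebscraping | main.py | transform_specs
-- ===== SOURCE A (Python) =====
-- features = ["construction year", "building condition", "street frontage width", "number of frontages", "living area",
--             "bedrooms", "bathrooms", "kitchen surface", "toilets", "basement", "attic", "primary energy consumption",
--             "energy class", "heating type", "surface of the plot"]
--
-- def transform_specs(specs):
--     specs_map = {}
--     for feature in features:
--         for spec in specs:
--             if feature in spec.lower():
--                 specs_map[feature] = spec.lower().split(feature)[-1]
--                 break
--     return specs_map
-- ===== SOURCE B (Python) =====
-- features = ["construction year", "building condition", "street frontage width", "number of frontages", "living area",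
--             "bedrooms", "bathrooms", "kitchen surface", "toilets", "basement", "attic", "primary energy consumption",
--             "energy class", "heating type", "surface of the plot"]
--
-- def transform_specs(specs):
--     # walk the specs BACK TO FRONT and overwrite unconditionally: the last write for a
--     # feature comes from the earliest containing spec, so no first-match test or break
--     # is needed; then emit the found features in feature order
--     vals = {}
--     for spec in reversed(specs):
--         low = spec.lower()
--         for f in features:
--             if f in low:
--                 vals[f] = low.split(f)[-1]
--     return {f: vals[f] for f in features if f in vals}
-- ===== Notes on version B (the rewrite author's own statement) =====
-- stated objective: alternative
-- what changed: Replaced A's feature-major first-match scan (inner loop over specs with a break per feature) by a back-to-front pass over the specs with unconditional last-write-wins overwrites -- no first-match test, no break -- relying on the proved fact that the last write while traversing reversed specs is the earliest containing spec; each spec is lowered once instead of once per feature, and results are emitted in feature order.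
import Mathlib
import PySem

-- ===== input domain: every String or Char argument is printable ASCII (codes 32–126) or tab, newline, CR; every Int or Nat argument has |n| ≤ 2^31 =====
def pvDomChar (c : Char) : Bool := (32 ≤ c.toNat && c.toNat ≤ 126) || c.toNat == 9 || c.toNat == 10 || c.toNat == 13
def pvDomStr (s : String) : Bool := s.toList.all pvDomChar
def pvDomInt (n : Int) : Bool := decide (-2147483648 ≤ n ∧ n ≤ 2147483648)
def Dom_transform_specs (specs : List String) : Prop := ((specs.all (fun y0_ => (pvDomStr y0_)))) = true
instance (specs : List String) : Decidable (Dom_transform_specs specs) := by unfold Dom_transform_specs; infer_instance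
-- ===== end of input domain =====

-- B walks the specs back to front with unconditional last-write-wins overwrites instead of
-- A's feature-major first-match-with-break scan; objective: alternative decomposition, same cost.

-- ===== PORT A =====
def pvFeatures : List String :=
  ["construction year", "building condition", "street frontage width", "number of frontages", "living area",
   "bedrooms", "bathrooms", "kitchen surface", "toilets", "basement", "attic", "primary energy consumption",
   "energy class", "heating type", "surface of the plot"]

-- spec.lower().split(feature)[-1]; split? is some (feature ≠ ""), the list is nonempty, so the getD defaults never fire
def pvSplitLast (low feature : String) : String :=
  (PySem.List.pyGet? ((PySem.Str.split? low feature).getD []) (-1)).getD ""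

-- A's inner 'for spec in specs: … break'
def pvInnerA (feature : String) : List String → PySem.Dict String String → PySem.Dict String String
  | [], m => m
  | spec :: rest, m =>
      if PySem.Str.isIn feature (PySem.Str.lower spec) then
        m.insert feature (pvSplitLast (PySem.Str.lower spec) feature)
      else pvInnerA feature rest m

def transform_specs (specs : List String) : List (String × String) :=
  (pvFeatures.foldl (fun m feature => pvInnerA feature specs m) PySem.Dict.empty).items

-- ===== PORT B =====
-- B's inner 'for f in features: if f in low: vals[f] = low.split(f)[-1]' (unconditional overwrite)
def pvStepB (d : PySem.Dict String String) (spec : String) : PySem.Dict String String :=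
  pvFeatures.foldl
    (fun d f =>
      if PySem.Str.isIn f (PySem.Str.lower spec) then
        d.insert f (pvSplitLast (PySem.Str.lower spec) f)
      else d) d

def transform_specs_alt (specs : List String) : List (String × String) :=
  let vals := specs.reverse.foldl pvStepB PySem.Dict.empty
  (pvFeatures.foldl
    (fun d f => if vals.contains f then d.insert f ((vals.get? f).getD "") else d)
    PySem.Dict.empty).items

-- ===== PRECONDITION & SPEC =====
def Spec_transform_specs (specs : List String) (out : List (String × String)) : Prop := out = transform_specs_alt specs
instance (specs : List String) (out : List (String × String)) : Decidable (Spec_transform_specs specs out) := by unfold Spec_transform_specs; infer_instance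

-- ===== CLAIM (what is proved, stated in full; the proofs are below) =====
def Claim_equal_transform_specs : Prop := ∀ (specs : List String), Dom_transform_specs specs → Spec_transform_specs specs (transform_specs specs)

-- ===== LEMMAS AND PROOFS =====

-- value A assigns to a feature: suffix from the first spec whose lowering contains it
def pvVal (feature : String) : List String → Option String
  | [] => none
  | spec :: rest =>
      if PySem.Str.isIn feature (PySem.Str.lower spec) then
        some (pvSplitLast (PySem.Str.lower spec) feature)
      else pvVal feature rest

theorem pvInnerA_eq (feature : String) (specs : List String) (m : PySem.Dict String String) :
    pvInnerA feature specs m =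
      match pvVal feature specs with
      | some v => m.insert feature v
      | none => m := by
  induction specs with
  | nil => rfl
  | cons s r ih =>
      simp only [pvInnerA, pvVal]
      split_ifs with h <;> simp [ih]

-- a fold that conditionally inserts fresh distinct keys appends the matched pairs
theorem pvFoldl_opt_insert (g : String → Option String) (fs : List String)
    (d : PySem.Dict String String) (hnd : fs.Nodup)
    (hfresh : ∀ f ∈ fs, d.contains f = false) :
    (fs.foldl (fun d f => match g f with | some v => d.insert f v | none => d) d).items =
      d.items ++ fs.filterMap (fun f => (g f).map (fun v => (f, v))) := by
  induction fs generalizing d with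
  | nil => simp
  | cons f r ih =>
      rcases List.nodup_cons.mp hnd with ⟨hfr, hr⟩
      have hdf : d.contains f = false := hfresh f (by simp)
      simp only [List.foldl_cons, List.filterMap_cons]
      cases hg : g f with
      | none =>
          rw [ih d hr (fun x hx => hfresh x (by simp [hx]))]
          simp
      | some v =>
          rw [ih (d.insert f v) hr ?_]
          · rw [PySem.Dict.items_insert_of_not_contains d v hdf]
            simp
          · intro x hx
            rw [PySem.Dict.contains_insert]
            have hxf : x ≠ f := fun h => hfr (h ▸ hx)
            simp [hxf, hfresh x (by simp [hx])]

theorem pvFeatures_nodup : pvFeatures.Nodup := by decide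

theorem pvItems_empty : (PySem.Dict.empty : PySem.Dict String String).items = [] := by
  simp [PySem.Dict.empty]

-- A's result, characterised
theorem transform_specs_eq (specs : List String) :
    transform_specs specs =
      pvFeatures.filterMap (fun f => (pvVal f specs).map (fun v => (f, v))) := by
  unfold transform_specs
  have h : (fun (m : PySem.Dict String String) (feature : String) => pvInnerA feature specs m) =
      (fun d f => match pvVal f specs with | some v => d.insert f v | none => d) := by
    funext m f; exact pvInnerA_eq f specs m
  rw [h, pvFoldl_opt_insert (fun f => pvVal f specs) pvFeatures PySem.Dict.empty
      pvFeatures_nodup (by simp [PySem.Dict.contains_empty]), pvItems_empty]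
  simp

-- B's overwrite pass over one spec, pointwise
theorem pvStepB_get? (spec : String) (fs : List String) (d : PySem.Dict String String) (f : String) :
    (fs.foldl
      (fun d g =>
        if PySem.Str.isIn g (PySem.Str.lower spec) then
          d.insert g (pvSplitLast (PySem.Str.lower spec) g)
        else d) d).get? f =
      if f ∈ fs ∧ PySem.Str.isIn f (PySem.Str.lower spec) then
        some (pvSplitLast (PySem.Str.lower spec) f)
      else d.get? f := by
  induction fs generalizing d with
  | nil => simp
  | cons g r ih =>
      simp only [List.foldl_cons]
      by_cases hgf : g = f
      · subst hgf
        by_cases hin : PySem.Str.isIn g (PySem.Str.lower spec) = true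
        · rw [if_pos hin, ih]
          by_cases hmem : g ∈ r ∧ PySem.Str.isIn g (PySem.Str.lower spec) = true
          · rw [if_pos hmem, if_pos ⟨by simp, hin⟩]
          · rw [if_neg hmem, if_pos ⟨by simp, hin⟩,
                PySem.Dict.get?_insert_self d g (pvSplitLast (PySem.Str.lower spec) g)]
        · rw [if_neg hin, ih d]
          rw [if_neg (fun h => hin h.2), if_neg (fun h => hin h.2)]
      · have hne : f ≠ g := fun h => hgf h.symm
        by_cases hin : PySem.Str.isIn g (PySem.Str.lower spec) = true
        · rw [if_pos hin, ih]
          rw [PySem.Dict.get?_insert_of_ne d (pvSplitLast (PySem.Str.lower spec) g) hne]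
          simp [hne]
        · rw [if_neg hin, ih d]
          simp [hne]

theorem pvStepB_get (spec : String) (d : PySem.Dict String String) (f : String) :
    (pvStepB d spec).get? f =
      if f ∈ pvFeatures ∧ PySem.Str.isIn f (PySem.Str.lower spec) then
        some (pvSplitLast (PySem.Str.lower spec) f)
      else d.get? f := pvStepB_get? spec pvFeatures d f

-- B's reversed pass: the LAST write for f (earliest containing spec) is exactly pvVal
theorem pvFoldB_get? (specs : List String) (f : String) (hf : f ∈ pvFeatures) :
    (specs.reverse.foldl pvStepB PySem.Dict.empty).get? f = pvVal f specs := by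
  rw [List.foldl_reverse]
  induction specs with
  | nil => simp [pvVal, PySem.Dict.get?_empty]
  | cons s r ih =>
      simp only [List.foldr_cons]
      rw [pvStepB_get s _ f]
      simp only [pvVal]
      by_cases hin : PySem.Str.isIn f (PySem.Str.lower s) = true
      · rw [if_pos ⟨hf, hin⟩, if_pos hin]
      · rw [if_neg (fun h => hin h.2), if_neg hin, ih]

theorem transform_specs_alt_eq (specs : List String) :
    transform_specs_alt specs =
      pvFeatures.filterMap (fun f => (pvVal f specs).map (fun v => (f, v))) := by
  have hdef : transform_specs_alt specs =
      (pvFeatures.foldl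
        (fun d f =>
          if (specs.reverse.foldl pvStepB PySem.Dict.empty).contains f then
            d.insert f (((specs.reverse.foldl pvStepB PySem.Dict.empty).get? f).getD "")
          else d)
        PySem.Dict.empty).items := rfl
  rw [hdef]
  have hstep : ∀ (d : PySem.Dict String String), ∀ f ∈ pvFeatures,
      (if (specs.reverse.foldl pvStepB PySem.Dict.empty).contains f then
          d.insert f (((specs.reverse.foldl pvStepB PySem.Dict.empty).get? f).getD "")
        else d) =
        (match pvVal f specs with | some v => d.insert f v | none => d) := by
    intro d f hf
    rw [PySem.Dict.contains_eq_isSome_get?, pvFoldB_get? specs f hf]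
    cases pvVal f specs <;> simp
  rw [PySem.List.foldl_congr_mem pvFeatures _ _ PySem.Dict.empty hstep]
  rw [pvFoldl_opt_insert (fun f => pvVal f specs) pvFeatures PySem.Dict.empty
      pvFeatures_nodup (by simp [PySem.Dict.contains_empty]), pvItems_empty]
  simp

-- ===== VERDICT (by name: the statement is the Claim_ definition above) =====
theorem transform_specs_spec : Claim_equal_transform_specs := by
  intro specs _
  unfold Spec_transform_specs
  rw [transform_specs_eq, transform_specs_alt_eq]
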